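-- pv_equiv track=rewrite | github.com/mj1618/codejam2018 | qual/1-fixed.py | compute
-- ===== SOURCE A (Python) =====
-- def compute(s):
--     sum=0
--     curr=1
--     for (i,c) in enumerate(s):
--         if c=='C':
--             curr*=2
--         else:
--             sum+=curr
--     return sum
-- ===== SOURCE B (Python) =====
-- def compute(s):
--     acc = 0
--     for c in reversed(s):
--         if c == 'C':
--             acc *= 2
--         else:
--             acc += 1
--     return acc
-- ===== Notes on version B (the rewrite author's own statement) =====
-- stated objective: alternative
-- what changed: B scans the string right-to-left maintaining a single weighted count that is doubled at each charge character and incremented otherwise, instead of A's forward pass with a separate multiplier and running sum.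
import Mathlib
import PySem

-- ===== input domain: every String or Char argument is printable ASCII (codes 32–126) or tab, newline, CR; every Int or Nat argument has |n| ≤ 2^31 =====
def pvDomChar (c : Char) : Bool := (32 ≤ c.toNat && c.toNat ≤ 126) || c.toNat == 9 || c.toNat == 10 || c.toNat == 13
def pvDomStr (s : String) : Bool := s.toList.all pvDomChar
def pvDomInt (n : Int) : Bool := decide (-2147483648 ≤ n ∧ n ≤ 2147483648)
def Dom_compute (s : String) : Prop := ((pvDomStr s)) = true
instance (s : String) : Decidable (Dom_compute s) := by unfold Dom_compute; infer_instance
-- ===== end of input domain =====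

-- B replaces A's forward (sum, multiplier) pass by a reversed scan with one accumulator, doubled at each charge character (objective: alternative decomposition).

-- ===== PORT A =====
-- forward fold carrying (sum, curr), as in A's loop
def compute (s : String) : Int :=
  (s.toList.foldl (fun (st : Int × Int) c =>
    if c = 'C' then (st.1, st.2 * 2) else (st.1 + st.2, st.2)) (0, 1)).1

-- ===== PORT B =====
-- reversed scan with a single accumulator (Source B iterates reversed(s))
def compute_alt (s : String) : Int :=
  s.toList.reverse.foldl (fun (acc : Int) c =>
    if c = 'C' then acc * 2 else acc + 1) 0

-- ===== PRECONDITION & SPEC =====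
def Spec_compute (s : String) (out : Int) : Prop := out = compute_alt s
instance (s : String) (out : Int) : Decidable (Spec_compute s out) := by unfold Spec_compute; infer_instance

-- ===== CLAIM (what is proved, stated in full; the proofs are below) =====
def Claim_equal_compute : Prop := ∀ (s : String), Dom_compute s → Spec_compute s (compute s)

-- ===== LEMMAS AND PROOFS =====

-- B's reversed foldl is a foldr on the original list
def g (c : Char) (acc : Int) : Int := if c = 'C' then acc * 2 else acc + 1

lemma alt_eq_foldr (s : String) :
    compute_alt s = s.toList.foldr g 0 := by
  unfold compute_alt
  rw [List.foldl_reverse]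
  rfl

-- A's fold from an arbitrary state equals sum + curr * foldr
lemma a_fold (l : List Char) (sum curr : Int) :
    (l.foldl (fun (st : Int × Int) c =>
      if c = 'C' then (st.1, st.2 * 2) else (st.1 + st.2, st.2)) (sum, curr)).1
    = sum + curr * l.foldr g 0 := by
  induction l generalizing sum curr with
  | nil => simp
  | cons c tl ih =>
    simp only [List.foldl_cons, List.foldr_cons, g]
    by_cases h : c = 'C' <;> simp [h, ih] <;> ring

-- ===== VERDICT (by name: the statement is the Claim_ definition above) =====
theorem compute_spec : Claim_equal_compute := by
  intro s _
  show compute s = compute_alt s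
  rw [alt_eq_foldr]
  unfold compute
  rw [a_fold]
  ring
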